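-- pv_equiv track=rewrite | github.com/houxizhu/python | leetcode/contest/20251012.biweekly.167/q2-.py | leetcode
-- ===== SOURCE A (Python) =====
-- from typing import List
--
-- def leetcode(nums: List[int]) -> int:
--     result = 2
--     ll = len(nums)
--     count = 2
--     for ii in range(2, ll):
--         if nums[ii] != nums[ii-1]+ nums[ii-2]:
--             count = 2
--         else:
--             count += 1
--
--         result = max(result, count)
--
--     return result
-- ===== SOURCE B (Python) =====
-- from itertools import groupby
--
-- def leetcode(nums):
--     ok = [nums[i] == nums[i-1] + nums[i-2] for i in range(2, len(nums))]
--     best = max((sum(1 for _ in g) for key, g in groupby(ok) if key), default=0)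
--     return 2 + best
-- ===== Notes on version B (the rewrite author's own statement) =====
-- stated objective: alternative
-- what changed: Replaces the single interleaved counter/maximum loop by a two-phase decomposition: first build the boolean list of positions satisfying the Fibonacci condition, then take the longest run of consecutive True values via itertools.groupby (C-level grouping) and add 2.
import Mathlib
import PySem

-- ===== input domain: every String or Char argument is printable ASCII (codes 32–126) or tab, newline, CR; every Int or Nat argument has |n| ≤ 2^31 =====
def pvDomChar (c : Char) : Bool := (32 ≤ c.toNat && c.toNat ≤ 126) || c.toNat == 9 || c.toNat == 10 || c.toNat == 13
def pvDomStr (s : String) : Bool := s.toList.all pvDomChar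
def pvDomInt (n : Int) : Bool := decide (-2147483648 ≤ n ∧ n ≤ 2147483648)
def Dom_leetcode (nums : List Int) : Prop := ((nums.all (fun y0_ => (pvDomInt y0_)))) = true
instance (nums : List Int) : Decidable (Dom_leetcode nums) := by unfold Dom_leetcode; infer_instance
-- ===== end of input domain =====

-- B replaces A's single interleaved counter/maximum loop by a two-phase pass: first build the
-- boolean list of positions satisfying the Fibonacci condition, then take the longest run of
-- consecutive True values via grouping (itertools.groupby) and add 2.

-- ===== PORT A =====
def leetcode (nums : List Int) : Int :=
  let ll : Int := PySem.List.len nums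
  let st := (PySem.List.pyRange 2 ll 1).foldl (fun (st : Int × Int) ii =>
    let count : Int :=
      if PySem.List.pyGetD nums ii 0 ≠ PySem.List.pyGetD nums (ii-1) 0 + PySem.List.pyGetD nums (ii-2) 0
      then 2 else st.2 + 1
    (max st.1 count, count)) (2, 2)
  st.1

-- ===== PORT B =====
-- port of itertools.groupby specialised to what Source B consumes: consecutive (key, group length) pairs
def pvGroups : List Bool → List (Bool × Int)
  | [] => []
  | b :: bs =>
    (b, 1 + ((bs.takeWhile (· == b)).length : Int)) :: pvGroups (bs.dropWhile (· == b))
termination_by bs => bs.length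
decreasing_by simp; exact List.length_dropWhile_le _ bs

def leetcode_alt (nums : List Int) : Int :=
  let ok : List Bool := (PySem.List.pyRange 2 (PySem.List.len nums) 1).map
    (fun i => decide (PySem.List.pyGetD nums i 0 =
                      PySem.List.pyGetD nums (i-1) 0 + PySem.List.pyGetD nums (i-2) 0))
  let best := ((pvGroups ok).filterMap (fun g => if g.1 then some g.2 else none)).foldl max 0
  2 + best

-- ===== PRECONDITION & SPEC =====
def Spec_leetcode (nums : List Int) (out : Int) : Prop := out = leetcode_alt nums
instance (nums : List Int) (out : Int) : Decidable (Spec_leetcode nums out) := by unfold Spec_leetcode; infer_instance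

-- ===== CLAIM (what is proved, stated in full; the proofs are below) =====
def Claim_equal_leetcode : Prop := ∀ (nums : List Int), Dom_leetcode nums → Spec_leetcode nums (leetcode nums)

-- ===== LEMMAS AND PROOFS =====

theorem pvGroups_nil : pvGroups [] = [] := by simp [pvGroups]

theorem pvGroups_cons (b : Bool) (bs : List Bool) : pvGroups (b :: bs) =
    (b, 1 + ((bs.takeWhile (· == b)).length : Int)) :: pvGroups (bs.dropWhile (· == b)) := by
  rw [pvGroups]

-- A's loop step, expressed on the boolean "Fibonacci condition holds here"
def stepA (st : Int × Int) (b : Bool) : Int × Int :=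
  let c : Int := if b then st.2 + 1 else 2
  (max st.1 c, c)

-- longest run of consecutive `true`s, with the leading run pre-extended by k
def bestWith : List Bool → Int → Int
  | [], k => k
  | true :: bs, k => bestWith bs (k + 1)
  | false :: bs, k => max k (bestWith bs 0)

theorem bestWith_ge : ∀ (bs : List Bool) (k : Int), k ≤ bestWith bs k
  | [], k => le_refl k
  | true :: bs, k => le_trans (by omega) (bestWith_ge bs (k+1))
  | false :: bs, k => le_max_left _ _

theorem scan_eq (bs : List Bool) : ∀ (r c : Int), c ≤ r → 2 ≤ c →
    (bs.foldl stepA (r, c)).1 = max r (2 + bestWith bs (c - 2)) := by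
  induction bs with
  | nil => intro r c h1 h2; simp [bestWith]; omega
  | cons b bs ih =>
    intro r c h1 h2
    cases b with
    | true =>
      have h := bestWith_ge bs (c - 1)
      rw [List.foldl_cons]
      have hs : stepA (r, c) true = (max r (c+1), c+1) := by simp [stepA]
      rw [hs, ih (max r (c+1)) (c+1) (le_max_right _ _) (by omega)]
      have harg : c + 1 - 2 = c - 1 := by omega
      have harg2 : c - 2 + 1 = c - 1 := by omega
      simp only [bestWith, harg, harg2]
      omega
    | false =>
      have h := bestWith_ge bs 0
      rw [List.foldl_cons]
      have hs : stepA (r, c) false = (max r 2, 2) := by simp [stepA]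
      rw [hs, ih (max r 2) 2 (le_max_right _ _) (le_refl 2)]
      have harg : (2:Int) - 2 = 0 := by omega
      simp only [bestWith, harg]
      omega

theorem takeWhile_eq_replicate (bs : List Bool) (b : Bool) :
    bs.takeWhile (· == b) = List.replicate (bs.takeWhile (· == b)).length b :=
  List.eq_replicate_of_mem (fun y hy => by simpa using List.mem_takeWhile_imp hy)

theorem dropWhile_head_false (p : Bool → Bool) : ∀ (bs : List Bool) (x : Bool) (r : List Bool),
    bs.dropWhile p = x :: r → p x = false
  | [], x, r => by simp
  | y :: ys, x, r => by
    by_cases hy : p y = true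
    · rw [List.dropWhile_cons_of_pos hy]; exact dropWhile_head_false p ys x r
    · rw [List.dropWhile_cons_of_neg hy]
      intro h
      cases h
      simpa using hy

theorem bestWith_replicate_true : ∀ (n : Nat) (bs : List Bool) (k : Int),
    bestWith (List.replicate n true ++ bs) k = bestWith bs (k + n)
  | 0, bs, k => by simp
  | n + 1, bs, k => by
    rw [List.replicate_succ, List.cons_append]
    show bestWith (List.replicate n true ++ bs) (k + 1) = _
    rw [bestWith_replicate_true n bs (k + 1)]
    congr 1
    push_cast
    ring

theorem bestWith_replicate_false : ∀ (j : Nat) (cs : List Bool),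
    bestWith (List.replicate j false ++ cs) 0 = bestWith cs 0
  | 0, cs => by simp
  | j + 1, cs => by
    rw [List.replicate_succ, List.cons_append]
    show max 0 (bestWith (List.replicate j false ++ cs) 0) = _
    rw [bestWith_replicate_false j cs]
    have := bestWith_ge cs 0
    omega

theorem filterMap_pick_cons_true (x : Int) (l : List (Bool × Int)) :
    List.filterMap (fun g => if g.1 = true then some g.2 else none) ((true, x) :: l)
      = x :: List.filterMap (fun g => if g.1 = true then some g.2 else none) l := by simp

theorem filterMap_pick_cons_false (x : Int) (l : List (Bool × Int)) :
    List.filterMap (fun g => if g.1 = true then some g.2 else none) ((false, x) :: l)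
      = List.filterMap (fun g => if g.1 = true then some g.2 else none) l := by simp

theorem groups_eq : ∀ (bs : List Bool) (m : Int), 0 ≤ m →
    ((pvGroups bs).filterMap (fun g => if g.1 then some g.2 else none)).foldl max m
      = max m (bestWith bs 0)
  | [], m => by intro hm; rw [pvGroups_nil]; simp [bestWith]; omega
  | b :: bs, m => by
    intro hm
    have hdec : bs = List.replicate (bs.takeWhile (· == b)).length b ++ bs.dropWhile (· == b) := by
      conv_lhs => rw [← List.takeWhile_append_dropWhile (p := (· == b)) (l := bs),
                      takeWhile_eq_replicate bs b]
    set n := (bs.takeWhile (· == b)).length with hn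
    set r := bs.dropWhile (· == b) with hr
    have hrec := groups_eq r
    cases b with
    | true =>
      rw [pvGroups_cons, filterMap_pick_cons_true, List.foldl_cons, ← hn, ← hr]
      rw [hrec (max m (1 + n)) (by positivity)]
      have hbw : bestWith (true :: bs) 0 = bestWith r (1 + n) := by
        conv_lhs => rw [hdec]
        rw [← List.cons_append, ← List.replicate_succ, bestWith_replicate_true (n+1) r 0]
        congr 1; push_cast; ring
      rw [hbw]
      match hr2 : r with
      | [] => simp [bestWith]; omega
      | x :: r' =>
        have hx : (x == true) = false := dropWhile_head_false _ bs x r' hr2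
        have hx' : x = false := by revert hx; cases x <;> simp
        subst hx'
        have h0 := bestWith_ge r' 0
        simp only [bestWith]
        omega
    | false =>
      rw [pvGroups_cons, filterMap_pick_cons_false, ← hr]
      rw [hrec m hm]
      have hbw : bestWith (false :: bs) 0 = max 0 (bestWith r 0) := by
        conv_lhs => rw [hdec]
        rw [← List.cons_append, ← List.replicate_succ, bestWith_replicate_false (n+1) r]
        have := bestWith_ge r 0
        omega
      rw [hbw]
      have := bestWith_ge r 0
      omega
  termination_by bs => bs.length
  decreasing_by simp; exact List.length_dropWhile_le _ bs

-- ===== VERDICT (by name: the statement is the Claim_ definition above) =====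
theorem leetcode_spec : Claim_equal_leetcode := by
  intro nums _
  unfold Spec_leetcode leetcode leetcode_alt
  set cond : Int → Bool := fun i => decide (PySem.List.pyGetD nums i 0 =
      PySem.List.pyGetD nums (i-1) 0 + PySem.List.pyGetD nums (i-2) 0) with hcond
  have hfold : ∀ (l : List Int) (st : Int × Int),
      l.foldl (fun (st : Int × Int) ii =>
        let count : Int :=
          if PySem.List.pyGetD nums ii 0 ≠ PySem.List.pyGetD nums (ii-1) 0 + PySem.List.pyGetD nums (ii-2) 0
          then 2 else st.2 + 1
        (max st.1 count, count)) st = (l.map cond).foldl stepA st := by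
    intro l
    induction l with
    | nil => intro st; rfl
    | cons x xs ih =>
      intro st
      rw [List.map_cons, List.foldl_cons, List.foldl_cons, ih]
      congr 1
      by_cases h : PySem.List.pyGetD nums x 0 = PySem.List.pyGetD nums (x-1) 0 + PySem.List.pyGetD nums (x-2) 0
      · simp [stepA, hcond, h]
      · simp [stepA, hcond, h]
  simp only
  rw [hfold]
  set ok := (PySem.List.pyRange 2 (PySem.List.len nums) 1).map cond with hok
  rw [scan_eq ok 2 2 (le_refl 2) (le_refl 2), groups_eq ok 0 (le_refl 0)]
  have h0 := bestWith_ge ok 0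
  have harg : (2:Int) - 2 = 0 := by omega
  rw [harg]
  omega
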